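-- pv_equiv track=rewrite | github.com/Curious-Lucifer/NCYU_Hackers_Course | Solve/Crypto_Lab/Identify/solve.py | is_base64
-- ===== SOURCE A (Python) =====
-- def is_base64(msg):
--     base64_char = 'ABCDEFGHIJKLMNOPQRSTUVWXYZabcdefghijklmnopqrstuvwxyz0123456789+/='
--     if (len(msg) % 4) != 0:
--         return False
--     for char in msg:
--         if not char in base64_char:
--             return False
--     return True
-- ===== SOURCE B (Python) =====
-- import re
--
-- _B64_RE = re.compile(r'[A-Za-z0-9+/=]*')
--
-- def is_base64(msg):
--     if (len(msg) % 4) != 0: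
--         return False
--     return _B64_RE.fullmatch(msg) is not None
-- ===== Notes on version B (the rewrite author's own statement) =====
-- stated objective: idiomatic
-- what changed: The per-character loop over an explicit 65-character alphabet string is replaced by a single precompiled-regex fullmatch against the character class [A-Za-z0-9+/=]*, keeping the len%4 guard.
import Mathlib
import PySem

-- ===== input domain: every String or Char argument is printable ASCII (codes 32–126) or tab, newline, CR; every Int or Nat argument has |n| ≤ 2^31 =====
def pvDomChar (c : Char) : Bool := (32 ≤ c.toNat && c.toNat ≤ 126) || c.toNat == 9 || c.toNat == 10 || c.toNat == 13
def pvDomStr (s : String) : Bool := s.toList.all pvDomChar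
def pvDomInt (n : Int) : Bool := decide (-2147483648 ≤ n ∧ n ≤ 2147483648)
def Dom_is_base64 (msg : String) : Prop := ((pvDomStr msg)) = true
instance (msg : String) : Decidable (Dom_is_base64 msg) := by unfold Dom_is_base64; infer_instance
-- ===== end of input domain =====

-- B replaces A's per-character loop over an explicit 65-char alphabet string by a single
-- regex full-match against the character class [A-Za-z0-9+/=]* (idiomatic; same cost class).

-- ===== PORT A =====
-- A's alphabet string, as the list of its characters
def pvAlphabet : List Char :=
  "ABCDEFGHIJKLMNOPQRSTUVWXYZabcdefghijklmnopqrstuvwxyz0123456789+/=".toList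

-- the 'for char in msg: if not char in base64_char: return False' loop
def pvLoopA : List Char → Bool
  | [] => true
  | c :: rest => if !(pvAlphabet.contains c) then false else pvLoopA rest

def is_base64 (msg : String) : Bool :=
  if PySem.Int.mod (PySem.Str.len msg) 4 ≠ 0 then false
  else pvLoopA msg.toList

-- ===== PORT B =====
-- the regex character class [A-Za-z0-9+/=], as its automaton's per-character range test
def pvB64Class (c : Char) : Bool :=
  ('A' ≤ c && c ≤ 'Z') || ('a' ≤ c && c ≤ 'z') || ('0' ≤ c && c ≤ '9')
    || c == '+' || c == '/' || c == '='

def is_base64_alt (msg : String) : Bool :=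
  if PySem.Int.mod (PySem.Str.len msg) 4 ≠ 0 then false
  else msg.toList.all pvB64Class    -- fullmatch of [A-Za-z0-9+/=]* : every char in the class

-- ===== PRECONDITION & SPEC =====
def Spec_is_base64 (msg : String) (out : Bool) : Prop := out = is_base64_alt msg
instance (msg : String) (out : Bool) : Decidable (Spec_is_base64 msg out) := by unfold Spec_is_base64; infer_instance

-- ===== CLAIM (what is proved, stated in full; the proofs are below) =====
def Claim_equal_is_base64 : Prop := ∀ (msg : String), Dom_is_base64 msg → Spec_is_base64 msg (is_base64 msg)

-- ===== LEMMAS AND PROOFS =====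
lemma toNat_ofNat_of_le (n : Nat) (h : n ≤ 126) : (Char.ofNat n).toNat = n := by
  rw [Char.ofNat, dif_pos (Or.inl (by omega : n < 0xd800))]
  simp [Char.toNat, Char.ofNatAux]

set_option maxRecDepth 8000 in
lemma mem_alphabet_iff (c : Char) (h : c.toNat ≤ 126) :
    pvAlphabet.contains c = pvB64Class c := by
  have hc : c = Char.ofNat c.toNat := by
    apply Char.ext; apply UInt32.toNat_inj.mp
    show c.toNat = (Char.ofNat c.toNat).toNat
    rw [toNat_ofNat_of_le _ h]
  rw [hc]
  interval_cases h' : c.toNat <;> decide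

lemma loopA_eq_all (cs : List Char) (hd : ∀ c ∈ cs, pvDomChar c = true) :
    pvLoopA cs = cs.all pvB64Class := by
  induction cs with
  | nil => rfl
  | cons c rest ih =>
    have hc : c.toNat ≤ 126 := by
      have := hd c (List.mem_cons_self ..)
      simp [pvDomChar] at this
      omega
    rw [List.all_cons, pvLoopA, mem_alphabet_iff c hc,
      ih (fun d hdm => hd d (List.mem_cons_of_mem _ hdm))]
    cases pvB64Class c <;> simp

-- ===== VERDICT (by name: the statement is the Claim_ definition above) =====
theorem is_base64_spec : Claim_equal_is_base64 := by
  intro msg hdom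
  unfold Spec_is_base64 is_base64 is_base64_alt
  have hd : ∀ c ∈ msg.toList, pvDomChar c = true := by
    simpa [Dom_is_base64, pvDomStr, List.all_eq_true] using hdom
  rw [loopA_eq_all _ hd]
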